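-- pv_equiv track=rewrite | github.com/CheungZeeCn/di | libs/datasets/t1_test_dataset_gp.py | get_segment_ids
-- ===== SOURCE A (Python) =====
-- def get_segment_ids(bboxs):
--     segment_ids = []
--     for i in range(len(bboxs)):
--         if i == 0:
--             segment_ids.append(0)
--         else:
--             if bboxs[i - 1] == bboxs[i]:
--                 segment_ids.append(segment_ids[-1])
--             else:
--                 segment_ids.append(segment_ids[-1] + 1)
--     return segment_ids
-- ===== SOURCE B (Python) =====
-- def get_segment_ids(bboxs):
--     if not bboxs:
--         return []
--     deltas = [0] + [0 if prev == cur else 1 for prev, cur in zip(bboxs, bboxs[1:])]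
--     ids = []
--     total = 0
--     for d in deltas:
--         total += d
--         ids.append(total)
--     return ids
-- ===== Notes on version B (the rewrite author's own statement) =====
-- stated objective: alternative
-- what changed: B first builds an explicit table of adjacent-change deltas (a zip of the list with its tail) and then emits the running prefix sums of that table, instead of A's single loop that indexes by position and reads back the last appended id.
import Mathlib
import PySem

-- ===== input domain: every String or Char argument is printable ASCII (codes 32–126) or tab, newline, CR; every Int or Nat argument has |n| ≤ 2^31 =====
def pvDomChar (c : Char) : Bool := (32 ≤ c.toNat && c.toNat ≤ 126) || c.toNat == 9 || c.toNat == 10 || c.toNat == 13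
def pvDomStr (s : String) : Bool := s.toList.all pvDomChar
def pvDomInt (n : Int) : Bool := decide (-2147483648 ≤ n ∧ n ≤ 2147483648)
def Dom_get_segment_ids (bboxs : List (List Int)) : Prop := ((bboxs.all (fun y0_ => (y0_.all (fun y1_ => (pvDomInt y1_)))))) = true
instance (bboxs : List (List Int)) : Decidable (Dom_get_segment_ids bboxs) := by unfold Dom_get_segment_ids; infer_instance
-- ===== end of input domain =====

-- B builds a separate adjacent-change delta table and returns its running prefix sums,
-- instead of A's index loop that reads back the last appended id; same cost, different decomposition.

-- ===== PORT A =====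
-- literal port of A; the indices i-1, i are always in range and segment_ids is nonempty
-- whenever segment_ids[-1] is read, so pyGet?/.getD are exact here
def get_segment_ids (bboxs : List (List Int)) : List Int :=
  (PySem.List.pyRange 0 (bboxs.length : Int)).foldl
    (fun segment_ids i =>
      if i = 0 then segment_ids ++ [(0 : Int)]
      else
        if PySem.List.pyGet? bboxs (i - 1) = PySem.List.pyGet? bboxs i then
          segment_ids ++ [(PySem.List.pyGet? segment_ids (-1)).getD 0]
        else
          segment_ids ++ [(PySem.List.pyGet? segment_ids (-1)).getD 0 + 1]) []

-- ===== PORT B =====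
-- the accumulation loop of Source B: state = (ids, total)
def pvAccum (deltas : List Int) : List Int :=
  (deltas.foldl (fun (st : List Int × Int) d => (st.1 ++ [st.2 + d], st.2 + d)) ([], 0)).1

def get_segment_ids_alt (bboxs : List (List Int)) : List Int :=
  match bboxs with
  | [] => []
  | _ :: _ =>
    let deltas :=
      0 :: ((bboxs.zip (bboxs.drop 1)).map (fun p => if p.1 = p.2 then (0 : Int) else 1))
    pvAccum deltas

-- ===== PRECONDITION & SPEC =====
def Spec_get_segment_ids (bboxs : List (List Int)) (out : List Int) : Prop := out = get_segment_ids_alt bboxs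
instance (bboxs : List (List Int)) (out : List Int) : Decidable (Spec_get_segment_ids bboxs out) := by unfold Spec_get_segment_ids; infer_instance

-- ===== CLAIM (what is proved, stated in full; the proofs are below) =====
def Claim_equal_get_segment_ids : Prop := ∀ (bboxs : List (List Int)), Dom_get_segment_ids bboxs → Spec_get_segment_ids bboxs (get_segment_ids bboxs)

-- ===== LEMMAS AND PROOFS =====

-- reference: ids of the elements after `prev`, current id `c`
def pvTailIds (prev : List Int) (rest : List (List Int)) (c : Int) : List Int :=
  match rest with
  | [] => []
  | y :: ys => (if prev = y then c else c + 1) :: pvTailIds y ys (if prev = y then c else c + 1)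

-- the id after consuming `rest`
def pvLastC (prev : List Int) (rest : List (List Int)) (c : Int) : Int :=
  match rest with
  | [] => c
  | y :: ys => pvLastC y ys (if prev = y then c else c + 1)

theorem pvAccum_tail (rest : List (List Int)) :
    ∀ (prev : List Int) (l : List Int) (c : Int),
    (((prev :: rest).zip rest).map (fun p => if p.1 = p.2 then (0 : Int) else 1)).foldl
        (fun (st : List Int × Int) d => (st.1 ++ [st.2 + d], st.2 + d)) (l, c)
      = (l ++ pvTailIds prev rest c, pvLastC prev rest c) := by
  induction rest with
  | nil => intro prev l c; simp [pvTailIds, pvLastC]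
  | cons y ys ih =>
    intro prev l c
    simp only [List.zip_cons_cons, List.map_cons, List.foldl_cons, pvTailIds, pvLastC]
    by_cases h : prev = y
    · simp [h]
      rw [ih y (l ++ [c]) c]
      simp
    · simp only [if_neg h]
      rw [ih y (l ++ [c + 1]) (c + 1)]
      simp

theorem pvB_eq (x : List Int) (xs : List (List Int)) :
    get_segment_ids_alt (x :: xs) = 0 :: pvTailIds x xs 0 := by
  simp only [get_segment_ids_alt, pvAccum, List.drop_one, List.tail_cons, List.foldl_cons]
  have := pvAccum_tail xs x ([] ++ [(0 : Int) + 0]) ((0 : Int) + 0)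
  simp only [List.nil_append] at this ⊢
  rw [this]
  simp

theorem pvA_tail (rest : List (List Int)) :
    ∀ (prev : List Int) (pre : List (List Int)) (acc : List Int) (c : Int)
      (bboxs : List (List Int)),
    bboxs = pre ++ prev :: rest → acc.getLast? = some c →
    (PySem.List.pyRange ((pre.length : Int) + 1) (bboxs.length : Int)).foldl
      (fun segment_ids i =>
        if i = 0 then segment_ids ++ [(0 : Int)]
        else
          if PySem.List.pyGet? bboxs (i - 1) = PySem.List.pyGet? bboxs i then
            segment_ids ++ [(PySem.List.pyGet? segment_ids (-1)).getD 0]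
          else
            segment_ids ++ [(PySem.List.pyGet? segment_ids (-1)).getD 0 + 1]) acc
      = acc ++ pvTailIds prev rest c := by
  induction rest with
  | nil =>
    intro prev pre acc c bboxs hb _
    have hlen : (bboxs.length : Int) = (pre.length : Int) + 1 := by
      subst hb; simp
    rw [hlen, PySem.List.pyRange_one]
    simp [pvTailIds]
  | cons y ys ih =>
    intro prev pre acc c bboxs hb hlast
    have hlt : ((pre.length : Int) + 1) < (bboxs.length : Int) := by
      subst hb
      simp only [List.length_append, List.length_cons]
      push_cast
      omega
    rw [PySem.List.pyRange_one_cons hlt, List.foldl_cons]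
    have hne : ¬ ((pre.length : Int) + 1 = 0) := by omega
    have hprev : PySem.List.pyGet? bboxs ((pre.length : Int) + 1 - 1) = some prev := by
      subst hb
      have : ((pre.length : Int) + 1 - 1) = (pre.length : Int) := by ring
      rw [this, PySem.List.pyGet?_natCast]
      simp
    have hy : PySem.List.pyGet? bboxs ((pre.length : Int) + 1) = some y := by
      subst hb
      have : ((pre.length : Int) + 1) = ((pre.length + 1 : Nat) : Int) := by push_cast; ring
      rw [this, PySem.List.pyGet?_natCast]
      simp
    have hacc : (PySem.List.pyGet? acc (-1)).getD 0 = c := by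
      rw [PySem.List.pyGet?_neg_one, hlast]; rfl
    by_cases h : prev = y
    · have hcond : PySem.List.pyGet? bboxs ((pre.length : Int) + 1 - 1) = PySem.List.pyGet? bboxs ((pre.length : Int) + 1) := by
        rw [hprev, hy, h]
      simp only [if_neg hne, if_pos hcond, hacc]
      have := ih y (pre ++ [prev]) (acc ++ [c]) c bboxs (by simp [hb]) (by simp)
      have harg : ((pre ++ [prev]).length : Int) + 1 = ((pre.length : Int) + 1) + 1 := by
        simp
      rw [harg] at this
      rw [this]
      simp [pvTailIds, h]
    · have hcond : ¬ (PySem.List.pyGet? bboxs ((pre.length : Int) + 1 - 1) = PySem.List.pyGet? bboxs ((pre.length : Int) + 1)) := by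
        rw [hprev, hy]; simp [h]
      simp only [if_neg hne, if_neg hcond, hacc]
      have := ih y (pre ++ [prev]) (acc ++ [c + 1]) (c + 1) bboxs (by simp [hb]) (by simp)
      have harg : ((pre ++ [prev]).length : Int) + 1 = ((pre.length : Int) + 1) + 1 := by
        simp
      rw [harg] at this
      rw [this]
      simp [pvTailIds, h]

theorem pvA_eq (x : List Int) (xs : List (List Int)) :
    get_segment_ids (x :: xs) = 0 :: pvTailIds x xs 0 := by
  unfold get_segment_ids
  have h0 : (0 : Int) < ((x :: xs).length : Int) := by
    simp only [List.length_cons]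
    push_cast
    omega
  rw [PySem.List.pyRange_one_cons h0, List.foldl_cons]
  simp only [List.nil_append]
  have := pvA_tail xs x [] [(0 : Int)] 0 (x :: xs) (by simp) (by simp)
  simp only [List.length_nil, Nat.cast_zero, zero_add] at this
  exact this

-- ===== VERDICT (by name: the statement is the Claim_ definition above) =====
theorem get_segment_ids_spec : Claim_equal_get_segment_ids := by
  intro bboxs _
  unfold Spec_get_segment_ids
  cases bboxs with
  | nil => rfl
  | cons x xs => rw [pvA_eq, pvB_eq]
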